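-- pv_equiv track=rewrite | github.com/verisimilitude20201/competitive-programming | Cracking_The_Coding_Interview/Arrays_And_Strings/does_string_contain_unique_chars.py | is_unique_chars2
-- ===== SOURCE A (Python) =====
-- def is_unique_chars2(string):
--     if len(string) > 128:
--         return False
--
--     char_unique = {}
--
--     for char in string:
--         if char in char_unique and char_unique[char]:
--             return False
--         char_unique[char] = True
--
--     return True
-- ===== SOURCE B (Python) =====
-- def is_unique_chars2(string):
--     if len(string) > 128:
--         return False
--     ordered = sorted(string)
--     for a, b in zip(ordered, ordered[1:]):
--         if a == b:
--             return False
--     return True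
-- ===== Notes on version B (the rewrite author's own statement) =====
-- stated objective: alternative
-- what changed: replaces the dict-membership single pass with sort-then-adjacent-scan: duplicates are detected by comparing consecutive characters of sorted(string)
import Mathlib
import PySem

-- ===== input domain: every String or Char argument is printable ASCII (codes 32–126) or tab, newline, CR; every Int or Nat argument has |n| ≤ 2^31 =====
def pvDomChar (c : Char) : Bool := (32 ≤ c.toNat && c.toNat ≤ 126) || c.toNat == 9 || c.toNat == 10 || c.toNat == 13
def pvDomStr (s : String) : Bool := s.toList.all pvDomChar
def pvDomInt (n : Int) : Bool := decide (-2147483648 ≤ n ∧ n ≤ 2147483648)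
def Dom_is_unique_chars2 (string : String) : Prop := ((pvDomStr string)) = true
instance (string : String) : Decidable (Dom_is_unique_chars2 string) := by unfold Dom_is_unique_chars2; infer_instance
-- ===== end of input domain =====

-- B replaces A's dict-membership single pass with sort-then-adjacent-scan (alternative algorithm, same results).


-- ===== PORT A =====
-- the 'for char in string' loop with its early return
def isUCLoop : List Char → PySem.Dict Char Bool → Bool
  | [], _ => true
  | c :: rest, d =>
    if d.contains c && d.getD c false then false
    else isUCLoop rest (d.insert c true)

def is_unique_chars2 (string : String) : Bool :=
  if PySem.Str.len string > 128 then false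
  else isUCLoop string.toList PySem.Dict.empty

-- ===== PORT B =====
-- the 'for a, b in zip(ordered, ordered[1:])' loop with its early return
def adjScan : List Char → Bool
  | a :: b :: rest => if a = b then false else adjScan (b :: rest)
  | _ => true

def is_unique_chars2_alt (string : String) : Bool :=
  if PySem.Str.len string > 128 then false
  else adjScan (PySem.List.sorted string.toList (fun x => x) false)

-- ===== PRECONDITION & SPEC =====
def Spec_is_unique_chars2 (string : String) (out : Bool) : Prop := out = is_unique_chars2_alt string
instance (string : String) (out : Bool) : Decidable (Spec_is_unique_chars2 string out) := by unfold Spec_is_unique_chars2; infer_instance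

-- ===== CLAIM (what is proved, stated in full; the proofs are below) =====
def Claim_equal_is_unique_chars2 : Prop := ∀ (string : String), Dom_is_unique_chars2 string → Spec_is_unique_chars2 string (is_unique_chars2 string)

-- ===== LEMMAS AND PROOFS =====

-- A's loop returns true iff the remaining chars are distinct and none was already recorded in the dict.
theorem isUCLoop_iff (l : List Char) (d : PySem.Dict Char Bool) :
    isUCLoop l d = true ↔ l.Nodup ∧ ∀ c ∈ l, d.getD c false = false := by
  induction l generalizing d with
  | nil => simp [isUCLoop]
  | cons c rest ih =>
    by_cases h : d.getD c false = true
    · have hc : d.contains c = true := by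
        rcases hg : d.get? c with _ | b
        · simp [PySem.Dict.getD_eq_get?_getD, hg] at h
        · rw [PySem.Dict.contains_eq_isSome_get?, hg]; rfl
      constructor
      · intro hfalse
        rw [isUCLoop, hc, h] at hfalse
        simp at hfalse
      · rintro ⟨_, hall⟩
        exact absurd (hall c (List.mem_cons_self)) (by simp [h])
    · have h' : d.getD c false = false := by simpa using h
      have hcond : (d.contains c && d.getD c false) = false := by simp [h']
      rw [isUCLoop, hcond, if_neg (by simp), ih]
      constructor
      · rintro ⟨hnd, hall⟩
        have hcr : c ∉ rest := by
          intro hm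
          have := hall c hm
          rw [PySem.Dict.getD_insert] at this
          simp at this
        refine ⟨List.nodup_cons.mpr ⟨hcr, hnd⟩, ?_⟩
        intro x hx
        rcases List.mem_cons.mp hx with hx | hx
        · simpa [hx] using h'
        · have := hall x hx
          rw [PySem.Dict.getD_insert] at this
          by_cases hxc : x = c
          · rw [if_pos hxc] at this; simp at this
          · rwa [if_neg hxc] at this
      · rintro ⟨hnd, hall⟩
        rcases List.nodup_cons.mp hnd with ⟨hcr, hnd'⟩
        refine ⟨hnd', ?_⟩
        intro x hx
        rw [PySem.Dict.getD_insert, if_neg (by rintro rfl; exact hcr hx)]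
        exact hall x (List.mem_cons.mpr (Or.inr hx))

-- B's scan returns true iff no two consecutive elements are equal.
theorem adjScan_iff (l : List Char) : adjScan l = true ↔ l.IsChain (· ≠ ·) := by
  induction l with
  | nil => simp [adjScan]
  | cons a t ih =>
    cases t with
    | nil => simp [adjScan]
    | cons b r =>
      by_cases h : a = b
      · simp [adjScan, h, List.isChain_cons_cons]
      · rw [adjScan, if_neg h, ih, List.isChain_cons_cons]
        tauto

-- the adjacent-distinct scan of the sorted list detects exactly duplicates in the original
theorem chain_sorted_iff_nodup (l : List Char) :
    (PySem.List.sorted l (fun x => x) false).IsChain (· ≠ ·) ↔ l.Nodup := by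
  set s := PySem.List.sorted l (fun x => x) false with hs
  have hperm : s.Perm l := PySem.List.sorted_perm l (fun x => x) false
  have hpw : s.Pairwise (· ≤ ·) := by
    simpa using PySem.List.sorted_pairwise l (fun x => x)
  constructor
  · intro hch
    have hle : s.IsChain (· ≤ ·) := List.isChain_iff_pairwise.mpr hpw
    have hlt : s.IsChain (· < ·) := by
      rw [List.isChain_iff_getElem] at hch hle ⊢
      intro i hi
      exact lt_of_le_of_ne (hle i hi) (hch i hi)
    have : s.Pairwise (· < ·) := List.isChain_iff_pairwise.mp hlt
    exact hperm.nodup_iff.mp (this.imp (fun h => ne_of_lt h))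
  · intro hnd
    have hnds : s.Nodup := hperm.nodup_iff.mpr hnd
    have : s.Pairwise (· < ·) :=
      (hpw.and hnds).imp (fun h => lt_of_le_of_ne h.1 h.2)
    exact (List.isChain_iff_pairwise.mpr this).imp fun {a b} h => ne_of_lt h

theorem is_unique_chars2_eq (string : String) :
    is_unique_chars2 string = is_unique_chars2_alt string := by
  unfold is_unique_chars2 is_unique_chars2_alt
  by_cases hlen : PySem.Str.len string > 128
  · rw [if_pos hlen, if_pos hlen]
  · rw [if_neg hlen, if_neg hlen]
    rw [Bool.eq_iff_iff, isUCLoop_iff, adjScan_iff, chain_sorted_iff_nodup]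
    simp [PySem.Dict.getD_empty]

-- ===== VERDICT (by name: the statement is the Claim_ definition above) =====
theorem is_unique_chars2_spec : Claim_equal_is_unique_chars2 := by
  intro s _
  exact is_unique_chars2_eq s
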